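-- pv_equiv track=rewrite | github.com/jasso23monkey/SE-Practica-1-Juan-Jasso | IA-Juan-Jasso/01_Búsqueda_Grafos/03_Satisfacción_De_Restricciones/003_Comprob_Delante.py | es_consistente
-- ===== SOURCE A (Python) =====
-- def es_consistente(variable, valor, asignacion):
--     """
--     Verifica si asignar 'valor' a 'variable' viola alguna restricción
--     con las asignaciones que ya están hechas.
--     """
--     RESTRICCIONES_VECINOS = [('T1', 'T2'), ('T1', 'T3'), ('T2', 'T3')] # Definición local para el ejemplo
--
--     for v1, v2 in RESTRICCIONES_VECINOS:
--         # Chequea la restricción (v1 != v2)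
--
--         # 1. Caso: La variable actual es v1 y v2 ya está asignada
--         if v1 == variable and v2 in asignacion:
--             if valor == asignacion[v2]:
--                 return False
--
--         # 2. Caso: La variable actual es v2 y v1 ya está asignada
--         elif v2 == variable and v1 in asignacion:
--             if valor == asignacion[v1]:
--                 return False
--
--     return True
-- ===== SOURCE B (Python) =====
-- def es_consistente(variable, valor, asignacion):
--     """The constraint list is the complete graph on {T1,T2,T3}, so instead
--     of scanning edges we scan vertices: if `variable` is a triangle vertex,
--     the assignment is consistent iff no OTHER triangle vertex already holds
--     `valor`; any variable outside the triangle is unconstrained."""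
--     TRIANGULO = ('T1', 'T2', 'T3')
--     if variable not in TRIANGULO:
--         return True
--     return not any(v != variable and asignacion.get(v) == valor
--                    for v in TRIANGULO)
-- ===== Notes on version B (the rewrite author's own statement) =====
-- stated objective: simpler
-- what changed: B drops the edge scan entirely: exploiting that the constraint list is the complete graph on {T1,T2,T3}, it iterates over the three vertices and rejects iff some other vertex is already assigned valor, instead of A's per-constraint-pair branch logic with dict membership guards, indexing and early return.
import Mathlib
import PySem

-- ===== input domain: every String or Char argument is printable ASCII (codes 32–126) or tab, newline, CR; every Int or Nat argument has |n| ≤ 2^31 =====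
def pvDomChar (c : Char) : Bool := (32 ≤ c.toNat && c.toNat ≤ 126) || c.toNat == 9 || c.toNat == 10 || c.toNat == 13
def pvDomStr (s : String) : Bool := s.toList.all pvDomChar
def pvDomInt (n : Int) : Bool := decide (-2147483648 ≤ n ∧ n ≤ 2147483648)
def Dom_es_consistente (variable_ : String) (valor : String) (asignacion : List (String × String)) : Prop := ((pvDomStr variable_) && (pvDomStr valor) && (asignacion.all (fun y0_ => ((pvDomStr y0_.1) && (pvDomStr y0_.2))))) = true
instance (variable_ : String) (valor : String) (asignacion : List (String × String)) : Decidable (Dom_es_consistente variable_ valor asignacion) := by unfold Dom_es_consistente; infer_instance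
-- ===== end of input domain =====

-- B replaces A's edge scan over constraint pairs by a vertex scan over the complete triangle {T1,T2,T3}; objective: simpler.


-- ===== PORT A =====
-- loop over the constraint list with A's early return, branches in A's order
def esA_loop (variable_ : String) (valor : String) (asignacion : List (String × String)) : List (String × String) → Bool
  | [] => true
  | (v1, v2) :: rest =>
    if v1 == variable_ && (asignacion.lookup v2).isSome then
      if valor == (asignacion.lookup v2).getD "" then false
      else esA_loop variable_ valor asignacion rest
    else if v2 == variable_ && (asignacion.lookup v1).isSome then
      if valor == (asignacion.lookup v1).getD "" then false
      else esA_loop variable_ valor asignacion rest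
    else esA_loop variable_ valor asignacion rest

def es_consistente (variable_ : String) (valor : String) (asignacion : List (String × String)) : Bool :=
  esA_loop variable_ valor asignacion [("T1", "T2"), ("T1", "T3"), ("T2", "T3")]

-- ===== PORT B =====
-- vertex scan: consistent iff variable is outside the triangle, or no OTHER
-- triangle vertex is already assigned valor
def es_consistente_alt (variable_ : String) (valor : String) (asignacion : List (String × String)) : Bool :=
  if !(["T1", "T2", "T3"].contains variable_) then true
  else !(["T1", "T2", "T3"].any (fun v => v != variable_ && asignacion.lookup v == some valor))

-- ===== PRECONDITION & SPEC =====
def Spec_es_consistente (variable_ : String) (valor : String) (asignacion : List (String × String)) (out : Bool) : Prop := out = es_consistente_alt variable_ valor asignacion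
instance (variable_ : String) (valor : String) (asignacion : List (String × String)) (out : Bool) : Decidable (Spec_es_consistente variable_ valor asignacion out) := by unfold Spec_es_consistente; infer_instance

-- ===== CLAIM (what is proved, stated in full; the proofs are below) =====
def Claim_equal_es_consistente : Prop := ∀ (variable_ : String) (valor : String) (asignacion : List (String × String)), Dom_es_consistente variable_ valor asignacion → Spec_es_consistente variable_ valor asignacion (es_consistente variable_ valor asignacion)

-- ===== LEMMAS AND PROOFS =====
-- (x == y) on String written as the decide of the flipped equality
theorem beq_eq_decide_swap (x y : String) : (x == y) = decide (y = x) := by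
  by_cases h : x = y
  · subst h; simp
  · have h' : ¬ y = x := fun hyx => h hyx.symm
    simp [h, h']

-- ===== VERDICT (by name: the statement is the Claim_ definition above) =====
theorem es_consistente_spec : Claim_equal_es_consistente := by
  intro v val a _
  unfold Spec_es_consistente es_consistente es_consistente_alt
  by_cases h1 : v = "T1"
  · subst h1
    cases hB : List.lookup "T2" a <;> cases hC : List.lookup "T3" a <;>
      simp [esA_loop, hB, hC, beq_eq_decide_swap, Bool.and_comm] <;> simp [eq_comm]
  · by_cases h2 : v = "T2"
    · subst h2
      cases hA : List.lookup "T1" a <;> cases hC : List.lookup "T3" a <;>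
        simp [esA_loop, h1, hA, hC, beq_eq_decide_swap, Bool.and_comm] <;> simp [eq_comm]
    · by_cases h3 : v = "T3"
      · subst h3
        cases hA : List.lookup "T1" a <;> cases hB : List.lookup "T2" a <;>
          simp [esA_loop, h1, h2, hA, hB, beq_eq_decide_swap, Bool.and_comm] <;> simp [eq_comm]
      · simp [esA_loop, h1, h2, h3, beq_eq_decide_swap]
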